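-- pv_equiv track=rewrite | github.com/chleiva/mongo-movies-agent | backend/lambda/models.py | extract_first_xml_element
-- ===== SOURCE A (Python) =====
-- def extract_first_xml_element(input_str):
--     """
--     Extracts:
--     1. Text within the first pair of XML-like tags.
--     2. The tag name.
--     3. The remaining string after the closing tag.
--
--     Args:
--         input_str (str): The input string to process.
--
--     Returns:
--         tuple: (inner_text, tag_name, remaining_text) or (None, None, None) if not found
--     """
--     # Find the first opening tag
--     start_tag_open = input_str.find('<')
--     if start_tag_open == -1:
--         return None, None, None
--
--     start_tag_close = input_str.find('>', start_tag_open)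
--     if start_tag_close == -1:
--         return None, None, None
--
--     # Extract potential tag name
--     tag_name = input_str[start_tag_open + 1:start_tag_close]
--
--     # Validate tag name (must be non-empty and contain only word characters)
--     if not tag_name or not all(char.isalnum() or char == '_' for char in tag_name):
--         return None, None, None
--
--     # Find closing tag
--     closing_tag = f"</{tag_name}>"
--     end_tag_open = input_str.find(closing_tag, start_tag_close)
--     if end_tag_open == -1:
--         return None, None, None
--
--     # Extract inner text
--     inner_text = input_str[start_tag_close + 1:end_tag_open]
--
--     # Extract remaining text
--     end_tag_close = end_tag_open + len(closing_tag)
--     remaining_text = input_str[end_tag_close:]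
--
--     return inner_text, tag_name, remaining_text
-- ===== SOURCE B (Python) =====
-- def extract_first_xml_element(input_str):
--     """Single forward pass over a shared character iterator: a three-phase
--     streaming state machine (seek '<' / read-and-validate tag / online match
--     of the closing tag).  No find(), no index arithmetic.  The closing tag
--     "</tag>" contains '<' only at position 0 (tag chars are word characters),
--     so at most one candidate match is ever active and the streaming matcher
--     needs no backtracking: on a mismatch it restarts at 1 if the current
--     char is '<', else at 0."""
--     it = iter(input_str)
--     # phase 1: seek the first '<'
--     for c in it:
--         if c == '<':
--             break
--     else:
--         return None, None, None
--     # phase 2: read the tag, validating each character as it streams by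
--     tag = []
--     for c in it:
--         if c == '>':
--             break
--         if c.isalnum() or c == '_':
--             tag.append(c)
--         else:
--             return None, None, None
--     else:
--         return None, None, None
--     if not tag:
--         return None, None, None
--     # phase 3: stream the body through the online closing-tag matcher
--     closing = '</' + ''.join(tag) + '>'
--     m = len(closing)
--     seen = []
--     j = 0
--     for c in it:
--         seen.append(c)
--         if c == closing[j]:
--             j += 1
--             if j == m:
--                 return ''.join(seen[:len(seen) - m]), ''.join(tag), ''.join(it)
--         else:
--             j = 1 if c == '<' else 0
--     return None, None, None
-- ===== Notes on version B (the rewrite author's own statement) =====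
-- stated objective: alternative
-- what changed: Replaces A's staged find/validate/find/slice passes with a single forward streaming pass over one shared character iterator: a three-state automaton that fuses tag validation into the scan and matches the closing tag online with a match-progress counter (no backtracking, exact because '<' occurs in '</tag>' only at position 0), instead of calling str.find at all.
import Mathlib
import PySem

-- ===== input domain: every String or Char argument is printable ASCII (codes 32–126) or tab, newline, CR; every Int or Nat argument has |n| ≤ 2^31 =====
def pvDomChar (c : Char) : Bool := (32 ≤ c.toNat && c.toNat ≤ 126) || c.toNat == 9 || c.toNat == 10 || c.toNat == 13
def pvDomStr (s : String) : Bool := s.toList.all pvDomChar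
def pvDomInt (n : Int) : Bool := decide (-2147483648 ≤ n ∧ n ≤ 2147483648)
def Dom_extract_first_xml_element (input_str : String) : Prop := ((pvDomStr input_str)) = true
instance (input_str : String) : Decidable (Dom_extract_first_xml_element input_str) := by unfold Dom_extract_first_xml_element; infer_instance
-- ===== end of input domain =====

-- B replaces A's staged find/slice passes by a single forward streaming pass: a three-state
-- character automaton with an online (no-backtracking) matcher for the closing tag (objective: alternative).

-- ===== PORT A =====
-- Transliteration of A: three str.find/str.find-from calls and index slices,
-- via PySem.Chars on input_str.toList (exact on the stated ASCII domain).
def extract_first_xml_element (input_str : String) : Option String × Option String × Option String :=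
  let s := input_str.toList
  let start_tag_open := PySem.Chars.find s ['<']
  if start_tag_open = -1 then (none, none, none)
  else
    let start_tag_close := PySem.Chars.findFrom s ['>'] start_tag_open none
    if start_tag_close = -1 then (none, none, none)
    else
      let tag_name := PySem.Chars.slice s (some (start_tag_open + 1)) (some start_tag_close)
      if tag_name = [] ∨ ¬ (tag_name.all fun c => PySem.Chars.isalnum c || c == '_') then
        (none, none, none)
      else
        let closing := '<' :: '/' :: (tag_name ++ ['>'])   -- f"</{tag_name}>"
        let end_tag_open := PySem.Chars.findFrom s closing start_tag_close none
        if end_tag_open = -1 then (none, none, none)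
        else
          let inner_text := PySem.Chars.slice s (some (start_tag_close + 1)) (some end_tag_open)
          let end_tag_close := end_tag_open + (closing.length : Int)
          let remaining_text := PySem.Chars.slice s (some end_tag_close) none
          (some (String.ofList inner_text), some (String.ofList tag_name), some (String.ofList remaining_text))

-- ===== PORT B =====
-- B's phases; the shared Python iterator `it` is the List Char cursor, each `for c in it`
-- loop is the obvious structural recursion on it, and the remaining iterator is the tail.
def pvIsWord (c : Char) : Bool := PySem.Chars.isalnum c || c == '_'

-- phase 1: seek the first '<'; returns the iterator after it (for-else: none on exhaustion)
def pvSeek : List Char → Option (List Char)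
  | [] => none
  | c :: cs => if c = '<' then some cs else pvSeek cs

-- phase 2: read the tag, validating each character as it streams by
def pvTag : List Char → List Char → Option (List Char × List Char)
  | [], _ => none
  | c :: cs, tag =>
    if c = '>' then some (tag, cs)
    else if pvIsWord c then pvTag cs (tag ++ [c])
    else none

-- phase 3: online closing-tag matcher; j = chars of `closing` currently matched
-- (Python's c == closing[j] is closing[j]? = some c: the automaton keeps j < len(closing))
def pvScan (closing : List Char) : List Char → Nat → List Char → Option (List Char × List Char)
  | [], _, _ => none
  | c :: cs, j, seen =>
    let seen' := seen ++ [c]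
    if closing[j]? = some c then
      if j + 1 = closing.length then some (seen'.take (seen'.length - closing.length), cs)
      else pvScan closing cs (j + 1) seen'
    else pvScan closing cs (if c = '<' then 1 else 0) seen'

def extract_first_xml_element_alt (input_str : String) : Option String × Option String × Option String :=
  match pvSeek input_str.toList with
  | none => (none, none, none)
  | some it1 =>
    match pvTag it1 [] with
    | none => (none, none, none)
    | some (tag, it2) =>
      if tag = [] then (none, none, none)
      else
        let closing := '<' :: '/' :: (tag ++ ['>'])   -- '</' + ''.join(tag) + '>'
        match pvScan closing it2 0 [] with
        | none => (none, none, none)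
        | some (inner, rest) =>
          (some (String.ofList inner), some (String.ofList tag), some (String.ofList rest))

-- ===== PRECONDITION & SPEC =====
def Spec_extract_first_xml_element (input_str : String) (out : Option String × Option String × Option String) : Prop := out = extract_first_xml_element_alt input_str
instance (input_str : String) (out : Option String × Option String × Option String) : Decidable (Spec_extract_first_xml_element input_str out) := by unfold Spec_extract_first_xml_element; infer_instance

-- ===== CLAIM (what is proved, stated in full; the proofs are below) =====
def Claim_equal_extract_first_xml_element : Prop := ∀ (input_str : String), Dom_extract_first_xml_element input_str → Spec_extract_first_xml_element input_str (extract_first_xml_element input_str)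

-- ===== LEMMAS AND PROOFS =====

-- Proof-side gadget: first-occurrence splitter; the common reference point both ports are
-- reduced to.  (Used only in proofs, not by either port.)
def pvSplitOn (sep : List Char) : List Char → Option (List Char × List Char)
  | [] => if sep.isPrefixOf [] then some ([], []) else none
  | c :: cs =>
    if sep.isPrefixOf (c :: cs) then some ([], (c :: cs).drop sep.length)
    else (pvSplitOn sep cs).map fun p => (c :: p.1, p.2)

-- pvSplitOn computes exactly Python str.find: none ↔ find = -1, and on success the
-- prefix length is the find index and the pieces reassemble the list.
theorem pvSplitOn_spec (sep : List Char) : ∀ (l : List Char),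
    (pvSplitOn sep l = none → PySem.Chars.find l sep = -1) ∧
    (∀ pre post, pvSplitOn sep l = some (pre, post) →
      PySem.Chars.find l sep = (pre.length : Int) ∧ l = pre ++ sep ++ post) := by
  intro l
  induction l with
  | nil =>
    by_cases hp : sep.isPrefixOf ([] : List Char)
    · have hsep : sep = [] := by simpa using List.isPrefixOf_iff_prefix.mp hp
      subst hsep
      refine ⟨fun h => by simp [pvSplitOn] at h, fun pre post h => ?_⟩
      simp [pvSplitOn] at h
      obtain ⟨rfl, rfl⟩ := h
      simp [PySem.Chars.find_nil]
    · refine ⟨fun _ => ?_, fun pre post h => by simp [pvSplitOn, hp] at h⟩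
      rw [PySem.Chars.find_eq_neg_one_iff]
      intro hinf
      exact hp (by simp [List.infix_nil.mp hinf])
  | cons c cs ih =>
    by_cases hp : sep.isPrefixOf (c :: cs)
    · have hpre : sep <+: c :: cs := List.isPrefixOf_iff_prefix.mp hp
      constructor
      · intro h; simp [pvSplitOn, hp] at h
      · intro pre post h
        simp [pvSplitOn, hp] at h
        obtain ⟨rfl, rfl⟩ := h
        have hnn : 0 ≤ PySem.Chars.find (c :: cs) sep :=
          (PySem.Chars.find_nonneg_iff _ _).mpr hpre.isInfix
        obtain ⟨h1, h2⟩ := PySem.Chars.find_spec hnn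
        have hz : (PySem.Chars.find (c :: cs) sep).toNat = 0 := by
          by_contra hne
          exact h2 0 (Nat.pos_of_ne_zero hne) (by simpa using hpre)
        constructor
        · simp only [List.length_nil, Nat.cast_zero]
          omega
        · obtain ⟨t, ht⟩ := hpre
          simp [← ht]
    · constructor
      · intro h
        simp [pvSplitOn, hp] at h
        have h1 := ih.1 h
        rw [PySem.Chars.find_eq_neg_one_iff] at h1 ⊢
        intro hinf
        rcases List.infix_cons_iff.mp hinf with hpre | hinf'
        · exact hp (List.isPrefixOf_iff_prefix.mpr hpre)
        · exact h1 hinf'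
      · intro pre post h
        simp [pvSplitOn, hp] at h
        obtain ⟨p1, hcs, hpp⟩ := h
        subst hpp
        obtain ⟨hf, heq⟩ := ih.2 p1 post hcs
        refine ⟨?_, by simpa using heq⟩
        have hnn' : 0 ≤ PySem.Chars.find cs sep := by rw [hf]; positivity
        have hinfcs : sep <:+: cs := (PySem.Chars.find_nonneg_iff _ _).mp hnn'
        have hnn : 0 ≤ PySem.Chars.find (c :: cs) sep :=
          (PySem.Chars.find_nonneg_iff _ _).mpr (List.infix_cons_iff.mpr (Or.inr hinfcs))
        obtain ⟨ha, hb⟩ := PySem.Chars.find_spec hnn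
        obtain ⟨ha', hb'⟩ := PySem.Chars.find_spec hnn'
        have htn : (PySem.Chars.find cs sep).toNat = p1.length := by omega
        have hf0 : (PySem.Chars.find (c :: cs) sep).toNat ≠ 0 := by
          intro h0
          exact hp (List.isPrefixOf_iff_prefix.mpr (by simpa [h0] using ha))
        -- upper bound
        have hub : (PySem.Chars.find (c :: cs) sep).toNat ≤ p1.length + 1 := by
          by_contra hgt
          exact hb (p1.length + 1) (by omega)
            (by simpa [List.drop_succ_cons, htn] using ha')
        -- lower bound
        have hlb : p1.length + 1 ≤ (PySem.Chars.find (c :: cs) sep).toNat := by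
          by_contra hlt
          have hd : List.drop (PySem.Chars.find (c :: cs) sep).toNat (c :: cs)
              = List.drop ((PySem.Chars.find (c :: cs) sep).toNat - 1) cs := by
            obtain ⟨k, hk⟩ := Nat.exists_eq_succ_of_ne_zero hf0
            simp [hk, List.drop_succ_cons]
          rw [hd] at ha
          exact hb' _ (by omega) ha
        simp only [List.length_cons]
        omega

theorem drop_len_append {α : Type} (A B : List α) (n : Nat) (h : n = A.length) :
    (A ++ B).drop n = B := by subst h; exact List.drop_left

theorem take_len_append {α : Type} (A B : List α) (n : Nat) (h : n = A.length) :
    (A ++ B).take n = A := by subst h; exact List.take_left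

-- A's result expressed through pvSplitOn (the intermediate form both ports reach).
def pvSpecExpr (s : List Char) : Option String × Option String × Option String :=
  match pvSplitOn ['<'] s with
  | none => (none, none, none)
  | some (_, rest) =>
    match pvSplitOn ['>'] rest with
    | none => (none, none, none)
    | some (tag, body) =>
      if tag = [] ∨ ¬ (tag.all fun c => PySem.Chars.isalnum c || c == '_') then
        (none, none, none)
      else
        match pvSplitOn ('<' :: '/' :: (tag ++ ['>'])) body with
        | none => (none, none, none)
        | some (inner, remaining) =>
          (some (String.ofList inner), some (String.ofList tag), some (String.ofList remaining))

theorem A_eq_spec (input_str : String) :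
    extract_first_xml_element input_str = pvSpecExpr input_str.toList := by
  simp only [extract_first_xml_element, pvSpecExpr]
  cases h0 : pvSplitOn ['<'] input_str.toList with
  | none =>
    have hf0 := (pvSplitOn_spec ['<'] input_str.toList).1 h0
    simp [hf0]
  | some pr0 =>
    obtain ⟨pre0, rest⟩ := pr0
    obtain ⟨hf0, heq0⟩ := (pvSplitOn_spec ['<'] input_str.toList).2 _ _ h0
    rw [hf0]
    rw [if_neg (by omega : ¬ ((pre0.length : Int) = -1))]
    have hk : pre0.length ≤ input_str.toList.length := by
      rw [heq0]; simp
    rw [PySem.Chars.findFrom_natCast _ _ _ hk]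
    have hdrop0 : input_str.toList.drop pre0.length = '<' :: rest := by
      rw [heq0]; simp [drop_len_append pre0 ('<' :: rest) pre0.length rfl]
    rw [hdrop0]
    have hsplit1 : pvSplitOn ['>'] ('<' :: rest) =
        (pvSplitOn ['>'] rest).map fun p => ('<' :: p.1, p.2) := by
      simp [pvSplitOn, List.isPrefixOf]
    cases h1 : pvSplitOn ['>'] rest with
    | none =>
      have hf1 := (pvSplitOn_spec ['>'] ('<' :: rest)).1 (by rw [hsplit1, h1]; rfl)
      rw [hf1]
      simp [h1]
    | some pr1 =>
      obtain ⟨pre1, body⟩ := pr1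
      obtain ⟨hf1, heq1⟩ := (pvSplitOn_spec ['>'] ('<' :: rest)).2 ('<' :: pre1) body
        (by rw [hsplit1, h1]; rfl)
      have hrest : rest = pre1 ++ ['>'] ++ body := by simpa using heq1
      rw [hf1]
      simp only [List.length_cons, Nat.cast_add, Nat.cast_one, h1]
      rw [if_neg (by omega : ¬ ((pre1.length : Int) + 1 = -1))]
      rw [if_neg (by omega : ¬ ((pre0.length : Int) + ((pre1.length : Int) + 1) = -1))]
      have htag : PySem.Chars.slice input_str.toList (some ((pre0.length : Int) + 1))
          (some ((pre0.length : Int) + ((pre1.length : Int) + 1))) = pre1 := by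
        rw [show ((pre0.length : Int) + 1) = ((pre0.length + 1 : Nat) : Int) from by push_cast; ring]
        rw [show ((pre0.length : Int) + ((pre1.length : Int) + 1)) = (((pre0.length + 1 : Nat) : Int) + ((pre1.length : Nat) : Int)) from by push_cast; ring]
        rw [PySem.Chars.slice_eq_listSlice, PySem.List.slice_natCast_add]
        have hd : input_str.toList.drop (pre0.length + 1) = rest := by
          rw [heq0, show pre0 ++ ['<'] ++ rest = (pre0 ++ ['<']) ++ rest from by simp]
          exact drop_len_append _ _ _ (by simp)
        rw [hd, hrest, show pre1 ++ ['>'] ++ body = pre1 ++ (['>'] ++ body) from by simp]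
        exact take_len_append _ _ _ rfl
      rw [htag]
      rw [show ((pre0.length : Int) + ((pre1.length : Int) + 1)) = ((pre0.length + pre1.length + 1 : Nat) : Int) from by push_cast; ring]
      have hk2 : pre0.length + pre1.length + 1 ≤ input_str.toList.length := by
        rw [heq0, hrest]; simp
      rw [PySem.Chars.findFrom_natCast _ _ _ hk2]
      have hdrop2 : input_str.toList.drop (pre0.length + pre1.length + 1) = '>' :: body := by
        rw [heq0, hrest, show pre0 ++ ['<'] ++ (pre1 ++ ['>'] ++ body) = (pre0 ++ ['<'] ++ pre1) ++ ('>' :: body) from by simp]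
        exact drop_len_append _ _ _ (by simp; omega)
      rw [hdrop2]
      have hsplit2 : pvSplitOn ('<' :: '/' :: (pre1 ++ ['>'])) ('>' :: body) =
          (pvSplitOn ('<' :: '/' :: (pre1 ++ ['>'])) body).map fun p => ('>' :: p.1, p.2) := by
        simp [pvSplitOn, List.isPrefixOf]
      cases h2 : pvSplitOn ('<' :: '/' :: (pre1 ++ ['>'])) body with
      | none =>
        have hf2 := (pvSplitOn_spec ('<' :: '/' :: (pre1 ++ ['>'])) ('>' :: body)).1
          (by rw [hsplit2, h2]; rfl)
        rw [hf2]
        simp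
      | some pr2 =>
        obtain ⟨pre2, post2⟩ := pr2
        obtain ⟨hf2, heq2⟩ := (pvSplitOn_spec ('<' :: '/' :: (pre1 ++ ['>'])) ('>' :: body)).2
          ('>' :: pre2) post2 (by rw [hsplit2, h2]; rfl)
        have hbody : body = pre2 ++ ('<' :: '/' :: (pre1 ++ ['>'])) ++ post2 := by
          simpa using heq2
        rw [hf2]
        simp only [List.length_cons, Nat.cast_add, Nat.cast_one]
        rw [if_neg (by omega : ¬ ((pre2.length : Int) + 1 = -1))]
        rw [if_neg (by omega : ¬ ((pre0.length : Int) + ↑pre1.length + 1 + ((pre2.length : Int) + 1) = -1))]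
        have hdrop3 : input_str.toList.drop (pre0.length + pre1.length + 2) = body := by
          rw [heq0, hrest, show pre0 ++ ['<'] ++ (pre1 ++ ['>'] ++ body) = (pre0 ++ ['<'] ++ pre1 ++ ['>']) ++ body from by simp]
          exact drop_len_append _ _ _ (by simp; omega)
        have hinner : PySem.Chars.slice input_str.toList (some ((pre0.length : Int) + ↑pre1.length + 1 + 1))
            (some ((pre0.length : Int) + ↑pre1.length + 1 + ((pre2.length : Int) + 1))) = pre2 := by
          rw [show ((pre0.length : Int) + ↑pre1.length + 1 + 1) = ((pre0.length + pre1.length + 2 : Nat) : Int) from by push_cast; ring]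
          rw [show ((pre0.length : Int) + ↑pre1.length + 1 + ((pre2.length : Int) + 1)) = (((pre0.length + pre1.length + 2 : Nat) : Int) + ((pre2.length : Nat) : Int)) from by push_cast; ring]
          rw [PySem.Chars.slice_eq_listSlice, PySem.List.slice_natCast_add, hdrop3, hbody,
            show pre2 ++ '<' :: '/' :: (pre1 ++ ['>']) ++ post2 = pre2 ++ ('<' :: '/' :: (pre1 ++ ['>']) ++ post2) from by simp]
          exact take_len_append _ _ _ rfl
        have hrem : PySem.Chars.slice input_str.toList
            (some ((pre0.length : Int) + ↑pre1.length + 1 + ((pre2.length : Int) + 1) + (↑(pre1 ++ ['>']).length + 1 + 1))) none = post2 := by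
          rw [show ((pre0.length : Int) + ↑pre1.length + 1 + ((pre2.length : Int) + 1) + (↑(pre1 ++ ['>']).length + 1 + 1)) = ((pre0.length + pre1.length + 1 + pre2.length + 1 + (pre1.length + 1 + 1 + 1) : Nat) : Int) from by simp [List.length_append]; ring]
          rw [PySem.Chars.slice_eq_listSlice, PySem.List.slice_from_natCast]
          rw [heq0, hrest, hbody, show pre0 ++ ['<'] ++ (pre1 ++ ['>'] ++ (pre2 ++ '<' :: '/' :: (pre1 ++ ['>']) ++ post2)) = (pre0 ++ ['<'] ++ pre1 ++ ['>'] ++ pre2 ++ ('<' :: '/' :: (pre1 ++ ['>']))) ++ post2 from by simp]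
          exact drop_len_append _ _ _ (by simp; omega)
        rw [hinner, hrem]

-- ---- B-side bridge lemmas: each phase of B computed as a first-occurrence split ----

-- phase 1 = split on '<', keep the right part
theorem pvSeek_eq : ∀ s : List Char, pvSeek s = (pvSplitOn ['<'] s).map Prod.snd := by
  intro s
  induction s with
  | nil => simp [pvSeek, pvSplitOn, List.isPrefixOf]
  | cons c cs ih =>
    by_cases hc : c = '<'
    · subst hc; simp [pvSeek, pvSplitOn, List.isPrefixOf]
    · have hp : (['<'] : List Char).isPrefixOf (c :: cs) = false := by
        simp [List.isPrefixOf]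
        exact fun h => hc h.symm
      cases h : pvSplitOn ['<'] cs with
      | none => simp [pvSeek, hc, pvSplitOn, hp, ih, h]
      | some p => simp [pvSeek, hc, pvSplitOn, hp, ih, h]

-- one-step unfoldings of pvSplitOn and pvTag (if-reduction kept explicit)
theorem pvSplitOn_cons_pos {sep : List Char} {c : Char} {cs : List Char}
    (h : sep.isPrefixOf (c :: cs) = true) :
    pvSplitOn sep (c :: cs) = some ([], (c :: cs).drop sep.length) := by
  rw [pvSplitOn, h, if_pos rfl]

theorem pvSplitOn_cons_neg {sep : List Char} {c : Char} {cs : List Char}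
    (h : sep.isPrefixOf (c :: cs) = false) :
    pvSplitOn sep (c :: cs) = (pvSplitOn sep cs).map fun p => (c :: p.1, p.2) := by
  rw [pvSplitOn, h, if_neg Bool.false_ne_true]

theorem pvTag_gt (cs acc : List Char) : pvTag ('>' :: cs) acc = some (acc, cs) := by
  simp [pvTag]

theorem pvTag_word {c : Char} (cs acc : List Char) (h1 : ¬ c = '>') (h2 : pvIsWord c = true) :
    pvTag (c :: cs) acc = pvTag cs (acc ++ [c]) := by
  rw [pvTag, if_neg h1, if_pos h2]

theorem pvTag_bad {c : Char} (cs acc : List Char) (h1 : ¬ c = '>') (h2 : pvIsWord c = false) :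
    pvTag (c :: cs) acc = none := by
  rw [pvTag, if_neg h1, if_neg (by rw [h2]; exact Bool.false_ne_true)]

-- phase 2 = split on '>', with the streamed validation folded in
theorem pvTag_eq : ∀ (s acc : List Char), pvTag s acc =
    (pvSplitOn ['>'] s).bind fun p =>
      if p.1.all pvIsWord then some (acc ++ p.1, p.2) else none := by
  intro s
  induction s with
  | nil => intro acc; simp [pvTag, pvSplitOn, List.isPrefixOf]
  | cons c cs ih =>
    intro acc
    by_cases hc : c = '>'
    · subst hc
      rw [pvTag_gt, pvSplitOn_cons_pos (by simp [List.isPrefixOf])]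
      simp only [List.length_cons, List.length_nil, List.drop_succ_cons, List.drop_zero,
        Option.bind_some, List.all_nil, if_true, List.append_nil]
    · have hp : (['>'] : List Char).isPrefixOf (c :: cs) = false := by
        simp [List.isPrefixOf]
        exact fun h => hc h.symm
      rw [pvSplitOn_cons_neg hp]
      by_cases hw : pvIsWord c
      · rw [pvTag_word cs acc hc hw, ih]
        cases h : pvSplitOn ['>'] cs with
        | none => simp
        | some p =>
          simp only [Option.map_some, Option.bind_some, List.all_cons, hw, Bool.true_and]
          by_cases ha : p.1.all pvIsWord
          · rw [if_pos ha, if_pos ha]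
            simp
          · rw [if_neg ha, if_neg ha]
      · rw [pvTag_bad cs acc hc (by simpa using hw)]
        cases h : pvSplitOn ['>'] cs with
        | none => simp
        | some p =>
          simp only [Option.map_some, Option.bind_some, List.all_cons,
            (by simpa using hw : pvIsWord c = false), Bool.false_and]
          rw [if_neg Bool.false_ne_true]

-- (a ++ [x]) is a suffix of (b ++ [y]) iff x = y and a is a suffix of b
theorem concat_suffix_concat {α : Type} (u x : List α) (a c : α) :
    u ++ [a] <:+ x ++ [c] ↔ a = c ∧ u <:+ x := by
  rw [← List.reverse_prefix]
  simp [List.cons_prefix_cons]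

-- an infix of x ++ [c] is an infix of x or a suffix of x ++ [c]
theorem infix_concat_cases {α : Type} (p x : List α) (c : α) (h : p <:+: x ++ [c]) :
    p <:+: x ∨ p <:+ x ++ [c] := by
  obtain ⟨s, t, ht⟩ := h
  rcases t.eq_nil_or_concat with rfl | ⟨t', c', rfl⟩
  · right; exact ⟨s, by simpa using ht⟩
  · left
    have ht' : (s ++ p ++ t') ++ [c'] = x ++ [c] := by simpa using ht
    have := (List.append_inj' ht' (by simp)).1
    exact ⟨s, t', this⟩

-- a prefix of an append no longer than the left part is a prefix of the left part
theorem prefix_append_of_length_le {α : Type} {p x y : List α} (h : p <+: x ++ y)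
    (hl : p.length ≤ x.length) : p <+: x :=
  List.prefix_of_prefix_length_le h (List.prefix_append x y) hl

-- pvSplitOn finds the exhibited occurrence when no earlier position carries one
theorem pvSplitOn_first (closing : List Char) (hcl : closing ≠ []) : ∀ (q cs : List Char),
    (∀ i, i < q.length → ¬ closing.isPrefixOf ((q ++ closing ++ cs).drop i) = true) →
    pvSplitOn closing (q ++ closing ++ cs) = some (q, cs) := by
  intro q
  induction q with
  | nil =>
    intro cs _
    obtain ⟨k, ks, rfl⟩ : ∃ k ks, closing = k :: ks := by
      cases closing with
      | nil => exact absurd rfl hcl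
      | cons k ks => exact ⟨k, ks, rfl⟩
    simp only [List.nil_append, List.cons_append]
    rw [pvSplitOn_cons_pos (by
      rw [← List.cons_append]
      exact List.isPrefixOf_iff_prefix.mpr (List.prefix_append _ _))]
    rw [← List.cons_append, drop_len_append _ _ _ rfl]
  | cons c0 q' ih =>
    intro cs hno
    have hw : (c0 :: q') ++ closing ++ cs = c0 :: (q' ++ closing ++ cs) := by simp
    rw [hw]
    have h0 : closing.isPrefixOf (c0 :: (q' ++ closing ++ cs)) = false := by
      have h := hno 0 (by simp)
      rw [hw] at h
      simp only [List.drop_zero] at h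
      exact Bool.eq_false_iff.mpr h
    rw [pvSplitOn_cons_neg h0]
    rw [ih cs (fun i hi => by
      have h := hno (i + 1) (by simp only [List.length_cons]; omega)
      rw [hw] at h
      simpa only [List.drop_succ_cons] using h)]
    rfl

-- peeling one matched character off a take-suffix of seen ++ [c]
theorem take_suffix_step (closing seen : List Char) (c : Char) (k : Nat)
    (hk0 : 0 < k) (hkm : k ≤ closing.length)
    (h : closing.take k <:+ seen ++ [c]) :
    closing.take (k - 1) <:+ seen ∧ closing[k - 1]? = some c := by
  have hlt : k - 1 < closing.length := by omega
  have hget : closing[k - 1]? = some closing[k - 1] := List.getElem?_eq_getElem hlt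
  have hdec : closing.take k = closing.take (k - 1) ++ [closing[k - 1]] := by
    conv_lhs => rw [show k = (k - 1) + 1 by omega]
    rw [List.take_add_one, hget]
    rfl
  rw [hdec] at h
  obtain ⟨he, hs⟩ := (concat_suffix_concat _ _ _ _).mp h
  exact ⟨hs, by rw [hget, he]⟩

-- the online matcher computes the first-occurrence split, given that the pattern
-- contains its first character '<' nowhere else
theorem pvScan_eq (closing : List Char)
    (H0 : closing[0]? = some '<')
    (Hu : ∀ k, 0 < k → closing[k]? ≠ some '<')
    (Hlen : 2 ≤ closing.length) :
    ∀ (rem : List Char) (j : Nat) (seen : List Char), j < closing.length →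
      closing.take j <:+ seen →
      (∀ k, 0 < k → k ≤ closing.length → closing.take k <:+ seen → k ≤ j) →
      ¬ closing <:+: seen →
      pvScan closing rem j seen = pvSplitOn closing (seen ++ rem) := by
  intro rem
  induction rem with
  | nil =>
    intro j seen _ _ _ hno
    rw [List.append_nil]
    cases h : pvSplitOn closing seen with
    | none => simp [pvScan]
    | some p =>
      obtain ⟨_, heq⟩ := (pvSplitOn_spec closing seen).2 p.1 p.2 (by rw [h])
      exact absurd ⟨p.1, p.2, heq.symm⟩ hno
  | cons c cs ih =>
    intro j seen hj hsuf hmax hno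
    have hne : closing ≠ [] := by intro h; rw [h] at Hlen; simp at Hlen
    have hseen' : seen ++ c :: cs = (seen ++ [c]) ++ cs := by simp
    by_cases hm : closing[j]? = some c
    · by_cases hj1 : j + 1 = closing.length
      · -- the match completes here
        simp only [pvScan, if_pos hm, if_pos hj1]
        have hcl : closing = closing.take j ++ [c] := by
          conv_lhs => rw [← List.take_length (l := closing), ← hj1]
          rw [List.take_add_one, hm]
          rfl
        have hsc : closing <:+ seen ++ [c] := by
          obtain ⟨v, hv⟩ := hsuf
          exact ⟨v, by rw [hcl, ← List.append_assoc, hv]⟩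
        obtain ⟨u, hu⟩ := hsc
        have hlens : u.length + closing.length = seen.length + 1 := by
          have := congrArg List.length hu
          simpa using this
        have htake : (seen ++ [c]).take ((seen ++ [c]).length - closing.length) = u := by
          rw [← hu]
          have h1 : (u ++ closing).length - closing.length = u.length := by
            simp
          rw [h1]
          exact take_len_append _ _ _ rfl
        have hfirst : pvSplitOn closing ((seen ++ [c]) ++ cs) = some (u, cs) := by
          rw [← hu]
          refine pvSplitOn_first closing hne u cs ?_
          intro i hi hpref
          have hpre : closing <+: (u ++ closing ++ cs).drop i :=
            List.isPrefixOf_iff_prefix.mp hpref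
          have hdrop1 : (u ++ closing ++ cs).drop i = ((seen ++ [c]).drop i) ++ cs := by
            rw [hu, List.drop_append_of_le_length (by simp; omega)]
          rw [hdrop1] at hpre
          have h2 : closing <+: (seen ++ [c]).drop i :=
            prefix_append_of_length_le hpre (by simp; omega)
          have hdrop2 : (seen ++ [c]).drop i = seen.drop i ++ [c] :=
            List.drop_append_of_le_length (by omega)
          rw [hdrop2] at h2
          have h3 : closing <+: seen.drop i :=
            prefix_append_of_length_le h2 (by simp; omega)
          exact hno (h3.isInfix.trans (List.drop_suffix i seen).isInfix)
        rw [hseen', hfirst, htake]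
      · -- a partial match advances
        simp only [pvScan, if_pos hm, if_neg hj1]
        rw [hseen']
        have hj' : j + 1 < closing.length := by omega
        refine ih (j + 1) (seen ++ [c]) hj' ?_ ?_ ?_
        · have hdec : closing.take (j + 1) = closing.take j ++ [c] := by
            rw [List.take_add_one, hm]
            rfl
          obtain ⟨v, hv⟩ := hsuf
          exact hdec ▸ ⟨v, by rw [← List.append_assoc, hv]⟩
        · intro k hk0 hkm hks
          obtain ⟨h5, h6⟩ := take_suffix_step closing seen c k hk0 hkm hks
          by_cases hk1 : k - 1 = 0
          · omega
          · have := hmax (k - 1) (by omega) (by omega) h5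
            omega
        · intro hinf
          rcases infix_concat_cases _ _ _ hinf with h | h
          · exact hno h
          · obtain ⟨h5, _⟩ := take_suffix_step closing seen c closing.length (by omega) le_rfl
              (by rw [List.take_length]; exact h)
            have := hmax (closing.length - 1) (by omega) (by omega) h5
            omega
    · -- mismatch: restart at 1 after '<', else at 0
      simp only [pvScan, if_neg hm]
      rw [hseen']
      refine ih (if c = '<' then 1 else 0) (seen ++ [c]) ?_ ?_ ?_ ?_
      · split <;> omega
      · by_cases hc : c = '<'
        · rw [if_pos hc]
          have ht1 : closing.take 1 = ['<'] := by
            rw [show (1 : Nat) = 0 + 1 from rfl, List.take_add_one, H0]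
            rfl
          exact ht1 ▸ ⟨seen, by rw [hc]⟩
        · rw [if_neg hc]
          simp
      · intro k hk0 hkm hks
        obtain ⟨h5, h6⟩ := take_suffix_step closing seen c k hk0 hkm hks
        by_cases hk1 : k - 1 = 0
        · have hc : c = '<' := by
            rw [hk1] at h6
            rw [H0] at h6
            exact (Option.some.inj h6).symm
          rw [if_pos hc]
          omega
        · have h7 := hmax (k - 1) (by omega) (by omega) h5
          rcases eq_or_lt_of_le h7 with he | hlt
          · exact absurd (he ▸ h6) hm
          · exfalso
            have hs1 : closing.take (k - 1) <:+ closing.take j :=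
              List.suffix_of_suffix_length_le h5 hsuf
                (by simp only [List.length_take]; omega)
            obtain ⟨w, hw⟩ := hs1
            have hwlen : w.length = j - (k - 1) := by
              have := congrArg List.length hw
              simp only [List.length_append, List.length_take] at this
              omega
            have h8 : (closing.take j)[w.length]? = some '<' := by
              rw [← hw, List.getElem?_append_right (Nat.le_refl _), Nat.sub_self,
                List.getElem?_take_of_lt (by omega), H0]
            have h9 : closing[w.length]? = some '<' := by
              rw [List.getElem?_take_of_lt (by omega)] at h8
              exact h8
            exact Hu w.length (by omega) h9
      · intro hinf
        rcases infix_concat_cases _ _ _ hinf with h | h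
        · exact hno h
        · obtain ⟨h5, h6⟩ := take_suffix_step closing seen c closing.length (by omega) le_rfl
            (by rw [List.take_length]; exact h)
          have h7 := hmax (closing.length - 1) (by omega) (by omega) h5
          have hj7 : j = closing.length - 1 := by omega
          exact hm (hj7 ▸ h6)

-- the concrete closing tag: '<' occurs only at its head, since tag chars are word chars
theorem closing_no_lt (tag : List Char) (ha : tag.all pvIsWord = true) :
    ∀ k, 0 < k → ('<' :: '/' :: (tag ++ ['>']))[k]? ≠ some '<' := by
  intro k hk h
  obtain ⟨k', rfl⟩ : ∃ k', k = k' + 1 := ⟨k - 1, by omega⟩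
  rw [List.getElem?_cons_succ] at h
  have hmem : '<' ∈ ('/' :: (tag ++ ['>'])) := List.mem_of_getElem? h
  rcases List.mem_cons.mp hmem with h1 | h1
  · exact absurd h1 (by decide)
  · rcases List.mem_append.mp h1 with h2 | h2
    · have := List.all_eq_true.mp ha '<' h2
      exact absurd this (by decide)
    · exact absurd (List.mem_singleton.mp h2) (by decide)

theorem B_eq_spec (input_str : String) :
    extract_first_xml_element_alt input_str = pvSpecExpr input_str.toList := by
  simp only [extract_first_xml_element_alt, pvSpecExpr]
  rw [pvSeek_eq]
  cases h0 : pvSplitOn ['<'] input_str.toList with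
  | none => rfl
  | some p0 =>
    obtain ⟨pre0, rest⟩ := p0
    simp only [Option.map_some]
    rw [pvTag_eq]
    cases h1 : pvSplitOn ['>'] rest with
    | none => rfl
    | some p1 =>
      obtain ⟨tag, body⟩ := p1
      simp only [Option.bind_some]
      by_cases ha : tag.all pvIsWord
      · rw [if_pos ha]
        simp only [List.nil_append]
        by_cases ht : tag = []
        · rw [if_pos ht, if_pos (Or.inl ht)]
        · have hval : ¬ (tag = [] ∨ ¬ (tag.all fun c => PySem.Chars.isalnum c || c == '_') = true) := by
            rintro (h | h)
            · exact ht h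
            · exact h (by simpa only [pvIsWord] using ha)
          rw [if_neg ht, if_neg hval]
          have hscan : pvScan ('<' :: '/' :: (tag ++ ['>'])) body 0 [] =
              pvSplitOn ('<' :: '/' :: (tag ++ ['>'])) body := by
            have h := pvScan_eq ('<' :: '/' :: (tag ++ ['>'])) rfl (closing_no_lt tag ha)
              (by simp) body 0 [] (by simp) (by simp) ?_ ?_
            · simpa using h
            · intro k hk0 hkm hks
              have := congrArg List.length (List.suffix_nil.mp hks)
              simp only [List.length_take, List.length_nil] at this
              omega
            · intro hinf
              have := List.infix_nil.mp hinf
              simp at this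
          rw [hscan]
      · rw [if_neg ha, if_pos (Or.inr (by simpa only [pvIsWord] using ha))]

-- ===== VERDICT (by name: the statement is the Claim_ definition above) =====
theorem extract_first_xml_element_spec : Claim_equal_extract_first_xml_element := by
  intro input_str _
  unfold Spec_extract_first_xml_element
  rw [A_eq_spec, B_eq_spec]
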